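-- pv_equiv track=rewrite | github.com/bncolorado/adsoScansionSystem | analysis/modules/AnalizadorSinalefas/PorReglas/sinalefaReglas.py | uneatonas
-- ===== SOURCE A (Python) =====
-- def uneatonas(verso, sinlalefPorResolver):
--         indice = int()
--         salida = ''
--         for item in verso:
--             if item == ' ' and indice < (len(verso)-1):
--                 if verso[indice-1] in 'aeiouh,;.:' and verso[indice+1] in 'aeiouh':
--                     if sinlalefPorResolver > 0:
--                         salida += u'_'
--                         sinlalefPorResolver = sinlalefPorResolver-1
--                     else:
--                         salida += item
--                 else:
--                     salida += item
--             else: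
--                 salida += item
--             indice += 1
--         return salida, sinlalefPorResolver
-- ===== SOURCE B (Python) =====
-- def uneatonas(verso, sinlalefPorResolver):
--     n = len(verso)
--     cands = [i for i in range(n)
--              if verso[i] == ' ' and i < n - 1
--              and verso[i - 1] in 'aeiouh,;.:' and verso[i + 1] in 'aeiouh']
--     k = min(len(cands), max(0, sinlalefPorResolver))
--     chosen = cands[:k]
--     out = ''.join('_' if i in chosen else verso[i] for i in range(n))
--     return out, sinlalefPorResolver - k
-- ===== Notes on version B (the rewrite author's own statement) =====
-- stated objective: alternative
-- what changed: A interleaves matching, budget bookkeeping and string building in one stateful scan; B first collects the list of candidate space positions, keeps the first min(len(cands), max(0, budget)) of them, then rebuilds the string by index substitution and returns the budget minus the number actually replaced.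
import Mathlib
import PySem

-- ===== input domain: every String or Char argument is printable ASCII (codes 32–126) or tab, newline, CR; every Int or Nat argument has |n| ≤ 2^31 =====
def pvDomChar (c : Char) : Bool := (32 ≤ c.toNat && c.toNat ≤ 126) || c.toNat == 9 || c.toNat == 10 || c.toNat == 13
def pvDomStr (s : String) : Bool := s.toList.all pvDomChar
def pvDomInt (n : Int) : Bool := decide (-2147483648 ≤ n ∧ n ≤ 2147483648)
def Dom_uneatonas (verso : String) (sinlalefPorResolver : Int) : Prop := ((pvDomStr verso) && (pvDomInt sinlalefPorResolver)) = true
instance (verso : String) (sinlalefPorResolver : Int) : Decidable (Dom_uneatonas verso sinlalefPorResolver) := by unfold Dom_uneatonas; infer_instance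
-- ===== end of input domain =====

-- B replaces A's single stateful scan by two passes: collect the candidate space
-- positions, keep the first min(len, max(0,budget)) of them, then rebuild the string
-- by index substitution (objective: alternative decomposition, same exact behaviour).


-- ===== PORT A =====
-- 'aeiouh,;.:' and 'aeiouh'
def snPrev : List Char := "aeiouh,;.:".toList
def snNext : List Char := "aeiouh".toList

-- single-character membership 'c in <string literal>' is exactly membership of the char
def snOptIn (o : Option Char) (cs : List Char) : Bool :=
  match o with
  | some c => cs.contains c
  | none => false

-- the for-loop of A, carrying (indice, salida, sinlalefPorResolver)
def uneatonasGo (s : List Char) (rest : List Char) (indice : Int) (salida : List Char)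
    (b : Int) : List Char × Int :=
  match rest with
  | [] => (salida, b)
  | item :: rest' =>
    if item = ' ' ∧ indice < (s.length : Int) - 1 then
      if snOptIn (PySem.List.pyGet? s (indice - 1)) snPrev = true
          ∧ snOptIn (PySem.List.pyGet? s (indice + 1)) snNext = true then
        if b > 0 then uneatonasGo s rest' (indice + 1) (salida ++ ['_']) (b - 1)
        else uneatonasGo s rest' (indice + 1) (salida ++ [item]) b
      else uneatonasGo s rest' (indice + 1) (salida ++ [item]) b
    else uneatonasGo s rest' (indice + 1) (salida ++ [item]) b

def uneatonas (verso : String) (sinlalefPorResolver : Int) : String × Int :=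
  let s := verso.toList
  let r := uneatonasGo s s 0 [] sinlalefPorResolver
  (String.ofList r.1, r.2)

-- ===== PORT B =====
-- the candidate condition of Source B's comprehension (verso[i] == ' ' and i < n-1 and …)
def uneatonasCond (s : List Char) (i : Int) : Bool :=
  (PySem.List.pyGet? s i == some ' ') && decide (i < (s.length : Int) - 1)
    && snOptIn (PySem.List.pyGet? s (i - 1)) snPrev
    && snOptIn (PySem.List.pyGet? s (i + 1)) snNext

def uneatonas_alt (verso : String) (sinlalefPorResolver : Int) : String × Int :=
  let s := verso.toList
  let n : Int := s.length
  let cands := (PySem.List.pyRange 0 n 1).filter (uneatonasCond s)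
  let k : Int := min (cands.length : Int) (max 0 sinlalefPorResolver)
  let chosen := PySem.List.slice cands none (some k)
  -- verso[i] for 0 ≤ i < n always succeeds; .getD ' ' is never the default branch
  let out := (PySem.List.pyRange 0 n 1).map
      (fun i => if chosen.contains i then '_' else (PySem.List.pyGet? s i).getD ' ')
  (String.ofList out, sinlalefPorResolver - k)

-- ===== PRECONDITION & SPEC =====
def Spec_uneatonas (verso : String) (sinlalefPorResolver : Int) (out : String × Int) : Prop := out = uneatonas_alt verso sinlalefPorResolver
instance (verso : String) (sinlalefPorResolver : Int) (out : String × Int) : Decidable (Spec_uneatonas verso sinlalefPorResolver out) := by unfold Spec_uneatonas; infer_instance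

-- ===== CLAIM (what is proved, stated in full; the proofs are below) =====
def Claim_equal_uneatonas : Prop := ∀ (verso : String) (sinlalefPorResolver : Int), Dom_uneatonas verso sinlalefPorResolver → Spec_uneatonas verso sinlalefPorResolver (uneatonas verso sinlalefPorResolver)

-- ===== LEMMAS AND PROOFS =====

-- the candidate positions at or after index j
def candsFrom (s : List Char) (j : Int) : List Int :=
  (PySem.List.pyRange j (s.length : Int) 1).filter (uneatonasCond s)

-- output of the suffix starting at index j, substituting '_' at positions in chosen
def snPaint (j : Int) (rest : List Char) (chosen : List Int) : List Char :=
  match rest with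
  | [] => []
  | c :: r => (if chosen.contains j then '_' else c) :: snPaint (j + 1) r chosen

-- number of replacements, as a Nat
def snK (cands : List Int) (b : Int) : Nat := min cands.length (max 0 b).toNat

lemma mem_candsFrom_ge {s : List Char} {j i : Int} (h : i ∈ candsFrom s j) : j ≤ i := by
  have := List.mem_filter.mp h
  exact (PySem.List.mem_pyRange_one.mp this.1).1

lemma candsFrom_nil {s : List Char} {j : Int} (h : (s.length : Int) ≤ j) :
    candsFrom s j = [] := by
  unfold candsFrom
  rw [PySem.List.pyRange_one_eq_nil h]
  rfl

lemma candsFrom_cons {s : List Char} {j : Int} (h : j < (s.length : Int)) :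
    candsFrom s j =
      if uneatonasCond s j then j :: candsFrom s (j + 1) else candsFrom s (j + 1) := by
  unfold candsFrom
  rw [PySem.List.pyRange_one_cons h]
  by_cases hc : uneatonasCond s j <;> simp [List.filter, hc]

lemma snPaint_cons_irrel {i : Int} : ∀ (rest : List Char) (j : Int) (ch : List Int),
    i < j → snPaint j rest (i :: ch) = snPaint j rest ch := by
  intro rest
  induction rest with
  | nil => intro j ch _; rfl
  | cons c r ih =>
    intro j ch hij
    have hne : (j == i) = false := by simp; omega
    simp only [snPaint, List.contains_cons, hne, Bool.false_or]
    rw [ih (j + 1) ch (by omega)]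

lemma snPaint_head_notmem {j : Int} {c : Char} {r : List Char} {ch : List Int}
    (h : j ∉ ch) : snPaint j (c :: r) ch = c :: snPaint (j + 1) r ch := by
  have : ch.contains j = false := by simpa using h
  simp only [snPaint, this, Bool.false_eq_true, if_false]

lemma go_eq (s : List Char) : ∀ (rest : List Char) (m : Nat) (acc : List Char) (b : Int),
    rest = s.drop m →
    uneatonasGo s rest (m : Int) acc b =
      (acc ++ snPaint (m : Int) rest ((candsFrom s (m : Int)).take (snK (candsFrom s (m : Int)) b)),
       b - min ((candsFrom s (m : Int)).length : Int) (max 0 b)) := by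
  intro rest
  induction rest with
  | nil =>
    intro m acc b hdrop
    have hlen : s.length ≤ m := by
      by_contra hlt
      have := congrArg List.length hdrop
      simp [List.length_drop] at this
      omega
    have hc : candsFrom s (m : Int) = [] := candsFrom_nil (by exact_mod_cast hlen)
    simp [uneatonasGo, hc, snPaint]
  | cons item rest' ih =>
    intro m acc b hdrop
    have hm : m < s.length := by
      by_contra hge
      rw [List.drop_eq_nil_of_le (by omega)] at hdrop
      simp at hdrop
    have hget : s[m]? = some item := by
      have h0 : (s.drop m)[0]? = some item := by rw [← hdrop]; rfl
      rw [List.getElem?_drop] at h0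
      simpa using h0
    have hrest' : rest' = s.drop (m + 1) := by
      have h1 : (s.drop m).tail = rest' := by rw [← hdrop]; rfl
      rw [← h1, List.tail_drop]
    have hpy : PySem.List.pyGet? s (m : Int) = some item := by
      rw [PySem.List.pyGet?_natCast]; exact hget
    have hmlt : (m : Int) < (s.length : Int) := by exact_mod_cast hm
    have hcast : (m : Int) + 1 = ((m + 1 : Nat) : Int) := by push_cast; ring
    have hcands := candsFrom_cons (s := s) (j := (m : Int)) hmlt
    set cands' := candsFrom s ((m : Int) + 1) with hcands'
    have hnotmem_take : ∀ K : Nat, (m : Int) ∉ cands'.take K := by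
      intro K hmem
      have := mem_candsFrom_ge (List.mem_of_mem_take hmem)
      omega
    by_cases hcond : uneatonasCond s (m : Int) = true
    · -- candidate position
      have hparts : item = ' ' ∧ (m : Int) < (s.length : Int) - 1
          ∧ snOptIn (PySem.List.pyGet? s ((m : Int) - 1)) snPrev = true
          ∧ snOptIn (PySem.List.pyGet? s ((m : Int) + 1)) snNext = true := by
        simp only [uneatonasCond, hpy, Bool.and_eq_true, beq_iff_eq, decide_eq_true_eq,
          Option.some.injEq] at hcond
        tauto
      rw [hcands, if_pos hcond]
      by_cases hb : b > 0
      · -- replacement performed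
        have hstep : uneatonasGo s (item :: rest') (m : Int) acc b
            = uneatonasGo s rest' ((m : Int) + 1) (acc ++ ['_']) (b - 1) := by
          rw [uneatonasGo, if_pos ⟨hparts.1, hparts.2.1⟩, if_pos ⟨hparts.2.2.1, hparts.2.2.2⟩,
            if_pos hb]
        rw [hstep, hcast, ih (m + 1) (acc ++ ['_']) (b - 1) hrest', ← hcast, ← hcands']
        have hK : snK ((m : Int) :: cands') b = snK cands' (b - 1) + 1 := by
          simp only [snK, List.length_cons]; omega
        rw [hK, List.take_succ_cons]
        have hhead : ((m : Int) :: cands'.take (snK cands' (b - 1))).contains (m : Int) = true := by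
          simp
        simp only [Prod.mk.injEq]
        constructor
        · rw [snPaint, hhead, if_pos rfl, snPaint_cons_irrel rest' _ _ (by omega)]
          simp
        · simp only [List.length_cons]
          push_cast
          omega
      · -- budget exhausted: char kept
        have hstep : uneatonasGo s (item :: rest') (m : Int) acc b
            = uneatonasGo s rest' ((m : Int) + 1) (acc ++ [item]) b := by
          rw [uneatonasGo, if_pos ⟨hparts.1, hparts.2.1⟩, if_pos ⟨hparts.2.2.1, hparts.2.2.2⟩,
            if_neg hb]
        rw [hstep, hcast, ih (m + 1) (acc ++ [item]) b hrest', ← hcast, ← hcands']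
        have hK0 : snK ((m : Int) :: cands') b = 0 := by
          simp only [snK, List.length_cons]; omega
        have hK0' : snK cands' b = 0 := by
          simp only [snK]; omega
        rw [hK0, hK0', List.take_zero, List.take_zero,
          snPaint_head_notmem (by simp)]
        simp only [Prod.mk.injEq]
        constructor
        · simp
        · simp only [List.length_cons]
          push_cast
          omega
    · -- not a candidate: char kept
      have hstep : uneatonasGo s (item :: rest') (m : Int) acc b
          = uneatonasGo s rest' ((m : Int) + 1) (acc ++ [item]) b := by
        rw [uneatonasGo]
        by_cases h1 : item = ' ' ∧ (m : Int) < (s.length : Int) - 1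
        · rw [if_pos h1]
          by_cases h2 : snOptIn (PySem.List.pyGet? s ((m : Int) - 1)) snPrev = true
              ∧ snOptIn (PySem.List.pyGet? s ((m : Int) + 1)) snNext = true
          · exfalso
            apply hcond
            simp only [uneatonasCond, hpy, Bool.and_eq_true, beq_iff_eq, decide_eq_true_eq,
              Option.some.injEq]
            exact ⟨⟨⟨h1.1, h1.2⟩, h2.1⟩, h2.2⟩
          · rw [if_neg h2]
        · rw [if_neg h1]
      rw [hstep, hcast, ih (m + 1) (acc ++ [item]) b hrest', ← hcast, ← hcands']
      rw [hcands, if_neg hcond]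
      rw [snPaint_head_notmem (hnotmem_take _)]
      simp

lemma map_paint (s : List Char) (chosen : List Int) : ∀ (rest : List Char) (m : Nat),
    rest = s.drop m →
    (PySem.List.pyRange (m : Int) (s.length : Int) 1).map
        (fun i => if chosen.contains i then '_' else (PySem.List.pyGet? s i).getD ' ')
      = snPaint (m : Int) rest chosen := by
  intro rest
  induction rest with
  | nil =>
    intro m hdrop
    have hlen : s.length ≤ m := by
      by_contra hlt
      have := congrArg List.length hdrop
      simp [List.length_drop] at this
      omega
    rw [PySem.List.pyRange_one_eq_nil (by exact_mod_cast hlen)]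
    rfl
  | cons item rest' ih =>
    intro m hdrop
    have hm : m < s.length := by
      by_contra hge
      rw [List.drop_eq_nil_of_le (by omega)] at hdrop
      simp at hdrop
    have hget : s[m]? = some item := by
      have h0 : (s.drop m)[0]? = some item := by rw [← hdrop]; rfl
      rw [List.getElem?_drop] at h0
      simpa using h0
    have hrest' : rest' = s.drop (m + 1) := by
      have h1 : (s.drop m).tail = rest' := by rw [← hdrop]; rfl
      rw [← h1, List.tail_drop]
    have hpy : PySem.List.pyGet? s (m : Int) = some item := by
      rw [PySem.List.pyGet?_natCast]; exact hget
    have hcast : (m : Int) + 1 = ((m + 1 : Nat) : Int) := by push_cast; ring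
    rw [PySem.List.pyRange_one_cons (by exact_mod_cast hm), List.map_cons,
      hpy]
    rw [snPaint]
    congr 1
    rw [hcast, ih (m + 1) hrest']

-- ===== VERDICT (by name: the statement is the Claim_ definition above) =====
theorem uneatonas_spec : Claim_equal_uneatonas := by
  unfold Claim_equal_uneatonas
  intro verso b _
  show uneatonas verso b = uneatonas_alt verso b
  unfold uneatonas uneatonas_alt
  dsimp only
  set C := (PySem.List.pyRange 0 ((verso.toList.length : Nat) : Int) 1).filter
      (uneatonasCond verso.toList) with hC
  have hCF : candsFrom verso.toList 0 = C := rfl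
  have hgo := go_eq verso.toList verso.toList 0 [] b (by simp)
  simp only [Nat.cast_zero, hCF] at hgo
  rw [hgo]
  have hk0 : (0 : Int) ≤ min ((C.length : Nat) : Int) (max 0 b) :=
    le_min (by positivity) (le_max_left 0 b)
  rw [PySem.List.slice_to C hk0]
  have htn : (min ((C.length : Nat) : Int) (max 0 b)).toNat = snK C b := by
    simp only [snK]
    omega
  rw [htn]
  have hmap := map_paint verso.toList (C.take (snK C b)) verso.toList 0 (by simp)
  simp only [Nat.cast_zero] at hmap
  rw [hmap]
  simp
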